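-- pv_equiv track=rewrite | github.com/AyushAgnihotri2025/CP-Solutions | GeeksforGeeks/Python3/Medium/Tree Transformation/tree-transformation.py | solve
-- ===== SOURCE A (Python) =====
-- from typing import List
--
-- def solve(N : int, p : List[int]) -> int:
--     # code here
--     count=0
--     dict={}
--     for i in p:
--         if i== (-1) or i ==0:
--             continue
--         else:
--             if i not in dict:
--                 dict[i]=1
--                 count+=1
--             dict[i]+=1
--     return count
-- ===== SOURCE B (Python) =====
-- from typing import List
--
-- def solve(N: int, p: List[int]) -> int:
--     kept = sorted(v for v in p if v != -1 and v != 0)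
--     if not kept:
--         return 0
--     count = 1
--     prev = kept[0]
--     for v in kept[1:]:
--         if v != prev:
--             count += 1
--         prev = v
--     return count
-- ===== Notes on version B (the rewrite author's own statement) =====
-- stated objective: alternative
-- what changed: Replaces the hash-dict membership counting with a filter-sort-then-scan pass that counts a value only when it differs from its predecessor in the sorted kept list.
import Mathlib
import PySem

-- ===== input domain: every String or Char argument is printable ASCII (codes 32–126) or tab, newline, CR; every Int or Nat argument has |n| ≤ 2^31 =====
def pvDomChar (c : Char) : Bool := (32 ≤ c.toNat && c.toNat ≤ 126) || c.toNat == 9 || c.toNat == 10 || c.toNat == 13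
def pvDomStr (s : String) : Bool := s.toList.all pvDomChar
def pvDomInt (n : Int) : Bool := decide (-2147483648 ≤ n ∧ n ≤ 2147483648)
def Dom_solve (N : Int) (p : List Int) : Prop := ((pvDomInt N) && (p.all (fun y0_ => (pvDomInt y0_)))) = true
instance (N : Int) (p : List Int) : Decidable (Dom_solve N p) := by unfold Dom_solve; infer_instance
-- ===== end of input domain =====

-- B replaces A's hash-dict distinct counting by filter-sort-then-adjacent-scan; alternative decomposition, same values.


-- ===== PORT A =====
-- literal port: fold over p with state (count, dict); `i in dict` = Dict.contains, `dict[i]+=1` = modify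
def solve (N : Int) (p : List Int) : Int :=
  (p.foldl
    (fun (st : Int × PySem.Dict Int Int) i =>
      if i == -1 || i == 0 then st
      else
        let st2 := if !st.2.contains i then (st.1 + 1, st.2.insert i 1) else st
        (st2.1, st2.2.modify i 0 (· + 1)))
    (0, PySem.Dict.empty)).1

-- ===== PORT B =====
-- literal port of Source B: filter, sort, then one scan with state (count, prev)
def solve_alt (N : Int) (p : List Int) : Int :=
  let kept := PySem.List.sorted (p.filter (fun v => !(v == -1) && !(v == 0))) (fun x => x) false
  match kept with
  | [] => 0
  | x :: xs =>
      (xs.foldl (fun (st : Int × Int) v => (if v != st.2 then st.1 + 1 else st.1, v)) (1, x)).1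

-- ===== PRECONDITION & SPEC =====
def Spec_solve (N : Int) (p : List Int) (out : Int) : Prop := out = solve_alt N p
instance (N : Int) (p : List Int) (out : Int) : Decidable (Spec_solve N p out) := by unfold Spec_solve; infer_instance

-- ===== CLAIM (what is proved, stated in full; the proofs are below) =====
def Claim_equal_solve : Prop := ∀ (N : Int) (p : List Int), Dom_solve N p → Spec_solve N p (solve N p)

-- ===== LEMMAS AND PROOFS =====

-- A's fold: count = initial count + number of distinct kept values not yet keys of the dict
theorem solveA_loop (xs : List Int) (c : Int) (d : PySem.Dict Int Int) :
    (xs.foldl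
      (fun (st : Int × PySem.Dict Int Int) i =>
        if i == -1 || i == 0 then st
        else
          let st2 := if !st.2.contains i then (st.1 + 1, st.2.insert i 1) else st
          (st2.1, st2.2.modify i 0 (· + 1)))
      (c, d)).1
    = c + (((xs.filter (fun v => !(v == -1) && !(v == 0))).filter
              (fun j => !d.contains j)).toFinset.card : Int) := by
  induction xs generalizing c d with
  | nil => simp
  | cons i rest ih =>
    simp only [List.foldl_cons]
    by_cases hk : (i == -1 || i == 0) = true
    · rw [if_pos hk, ih]
      have hkf : (!(i == -1) && !(i == 0)) = false := by
        cases h1 : (i == -1) <;> cases h2 : (i == 0) <;> simp_all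
      simp [List.filter_cons, hkf]
    · rw [if_neg hk]
      have hkeep : (!(i == -1) && !(i == 0)) = true := by
        cases h1 : (i == -1) <;> cases h2 : (i == 0) <;> simp_all
      have hsplit : (i :: rest).filter (fun v => !(v == -1) && !(v == 0))
          = i :: rest.filter (fun v => !(v == -1) && !(v == 0)) := by
        simp [List.filter_cons, hkeep]
      by_cases hc : d.contains i = true
      · -- already a key: count unchanged, key set of modify unchanged
        have h1 : (if (!(c, d).2.contains i) = true then ((c, d).1 + 1, (c, d).2.insert i 1) else (c, d)) = (c, d) := by
          simp [hc]
        rw [h1, ih]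
        congr 2
        rw [hsplit, List.filter_cons]
        rw [show (!d.contains i) = false by simp [hc]]
        simp only [Bool.false_eq_true, if_false]
        apply congrArg
        apply congrArg
        apply List.filter_congr
        intro j _
        rw [PySem.Dict.contains_modify]
        cases hji : (j == i)
        · simp [hji]
        · have hje : j = i := by simpa using hji
          simp [hje, hc]
      · -- new key: count+1, dict gains key i
        have h1 : (if (!(c, d).2.contains i) = true then ((c, d).1 + 1, (c, d).2.insert i 1) else (c, d)) = (c + 1, d.insert i 1) := by
          simp [hc]
        rw [h1, ih]
        have hcont : ∀ j, (((c + 1, d.insert i 1).2).modify i 0 (· + 1)).contains j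
            = (j == i || d.contains j) := by
          intro j
          rw [PySem.Dict.contains_modify, PySem.Dict.contains_insert]
          cases hji : (j == i) <;> simp [hji]
        have hfilter :
            ((rest.filter (fun v => !(v == -1) && !(v == 0))).filter
              (fun j => !(((c + 1, d.insert i 1).2).modify i 0 (· + 1)).contains j))
            = ((rest.filter (fun v => !(v == -1) && !(v == 0))).filter
              (fun j => !d.contains j)).filter (fun j => !(j == i)) := by
          rw [List.filter_filter, List.filter_filter, List.filter_filter]
          apply List.filter_congr
          intro j _
          rw [hcont j]
          cases hji : (j == i) <;> cases hjd : d.contains j <;> simp [hji, hjd]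
        rw [hfilter]
        have hins : (((i :: rest).filter (fun v => !(v == -1) && !(v == 0))).filter
              (fun j => !d.contains j)).toFinset
            = insert i (((rest.filter (fun v => !(v == -1) && !(v == 0))).filter
              (fun j => !d.contains j)).toFinset) := by
          rw [hsplit, List.filter_cons]
          rw [show (!d.contains i) = true by simp [hc]]
          simp
        rw [hins]
        set S := ((rest.filter (fun v => !(v == -1) && !(v == 0))).filter
              (fun j => !d.contains j)).toFinset with hS
        have herase : (((rest.filter (fun v => !(v == -1) && !(v == 0))).filter
              (fun j => !d.contains j)).filter (fun j => !(j == i))).toFinset = S.erase i := by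
          ext x
          simp [hS, List.mem_filter, Finset.mem_erase, and_comm, and_assoc]
          tauto
        rw [herase]
        have hcard : (insert i S).card = (S.erase i).card + 1 := by
          rw [← Finset.insert_erase (Finset.mem_insert_self i S),
              Finset.erase_insert_eq_erase,
              Finset.card_insert_of_notMem (Finset.notMem_erase i S)]
        rw [hcard]
        push_cast
        ring

-- B's scan over a sorted nonempty list counts the distinct elements
theorem solveB_scan (xs : List Int) (c x : Int)
    (hp : (x :: xs).Pairwise (· ≤ ·)) :
    (xs.foldl (fun (st : Int × Int) v => (if v != st.2 then st.1 + 1 else st.1, v)) (c, x)).1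
    = c + ((x :: xs).toFinset.card : Int) - 1 := by
  induction xs generalizing c x with
  | nil => simp
  | cons y ys ih =>
    have hp' : (y :: ys).Pairwise (· ≤ ·) := hp.tail
    have hxle : ∀ z ∈ y :: ys, x ≤ z := fun z hz => (List.pairwise_cons.mp hp).1 z hz
    simp only [List.foldl_cons]
    by_cases hxy : y = x
    · subst hxy
      rw [show (if (y != (c, y).2) = true then (c, y).1 + 1 else (c, y).1, y) = (c, y) by simp]
      rw [ih c y hp']
      have : (y :: y :: ys).toFinset = (y :: ys).toFinset := by simp
      rw [this]
    · have hbne : (y != x) = true := by simp [hxy]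
      rw [show (if (y != (c, x).2) = true then (c, x).1 + 1 else (c, x).1, y) = (c + 1, y) by simp [hbne]]
      rw [ih (c + 1) y hp']
      have hnot : x ∉ (y :: ys).toFinset := by
        simp only [List.mem_toFinset, List.mem_cons]
        rintro (h | h)
        · exact hxy h.symm
        · have h1 : x ≤ y := hxle y (by simp)
          have h2 : y ≤ x := (List.pairwise_cons.mp hp').1 x h
          exact hxy (le_antisymm h2 h1)
      have : (x :: y :: ys).toFinset = insert x (y :: ys).toFinset := by simp
      rw [this, Finset.card_insert_of_notMem hnot]
      push_cast
      ring

-- ===== VERDICT (by name: the statement is the Claim_ definition above) =====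
theorem solve_spec : Claim_equal_solve := by
  intro N p _
  unfold Spec_solve solve solve_alt
  rw [solveA_loop]
  simp only [PySem.Dict.contains_empty, Bool.not_false, List.filter_true]
  set f := p.filter (fun v => !(v == -1) && !(v == 0)) with hf
  have hperm : (PySem.List.sorted f (fun x => x) false).Perm f := PySem.List.sorted_perm f _ _
  cases hs : PySem.List.sorted f (fun x => x) false with
  | nil =>
    have : f = [] := (PySem.List.sorted_eq_nil_iff f (fun x => x) false).mp hs
    rw [this]
    simp
  | cons x xs =>
    have hpw : (x :: xs).Pairwise (· ≤ ·) := by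
      have := PySem.List.sorted_pairwise f (fun x => x) (κ := Int)
      rw [hs] at this
      exact this
    show 0 + ((f.toFinset.card : Nat) : Int)
      = (xs.foldl (fun (st : Int × Int) v => (if v != st.2 then st.1 + 1 else st.1, v)) (1, x)).1
    rw [solveB_scan xs 1 x hpw]
    have htf : (x :: xs).toFinset = f.toFinset := by
      ext z
      simp only [List.mem_toFinset]
      rw [← hs]
      exact hperm.mem_iff
    rw [htf]
    ring
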